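-- pv_equiv track=rewrite | github.com/yynozk/checkio | mine/amsco-cipher.py | decode_amsco
-- ===== SOURCE A (Python) =====
-- def decode_amsco(message, key):
--     digits = [int(d) - 1 for d in str(key)]
--     n = len(message)
--
--     cipher_map = [[] for _ in range(len(digits))]
--     while n > 0:
--         for idx, d in enumerate(digits):
--             length = (idx + len(cipher_map[d])) % 2 + 1
--             cipher_map[d].append(min(length, n))
--             n -= min(length, n)
--
--     for r, row in enumerate(cipher_map):
--         for c, length in enumerate(row):
--             cipher_map[r][c] = message[0:length]
--             message = message[length:]
--
--     cipher_map = [e[1] for e in sorted(enumerate(cipher_map), key=lambda e: digits.index(e[0]))]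
--     cipher_map = list(map(list, zip(*cipher_map)))
--     return "".join(["".join(r) for r in cipher_map])
-- ===== SOURCE B (Python) =====
-- def decode_amsco(message, key):
--     digits = [int(d) - 1 for d in str(key)]
--     L = len(digits)
--     n = len(message)
--     # chunk lengths in reading order: lens[r][idx] = min((idx + r) % 2 + 1, chars left)
--     lens = []
--     r = 0
--     while n > 0:
--         row = []
--         for idx in range(L):
--             take = min((idx + r) % 2 + 1, n)
--             row.append(take)
--             n -= take
--         lens.append(row)
--         r += 1
--     # ciphertext offset where each column starts (columns appear in the
--     # ciphertext in column-number order); ptr[d] then advances down column d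
--     col_total = [sum(row[idx] for row in lens) for idx in range(L)]
--     ptr = []
--     acc = 0
--     for d in range(L):
--         ptr.append(acc)
--         acc += col_total[digits.index(d)]
--     # emit the plaintext row by row, slicing each chunk straight out of the
--     # ciphertext at its computed offset
--     out = []
--     for row in lens:
--         for idx, d in enumerate(digits):
--             out.append(message[ptr[d]:ptr[d] + row[idx]])
--             ptr[d] += row[idx]
--     return "".join(out)
-- ===== Notes on version B (the rewrite author's own statement) =====
-- stated objective: alternative
-- what changed: B computes the chunk-length grid row-major and emits each plaintext chunk by slicing the ciphertext directly at an arithmetically computed offset (per-column start + an advancing per-column pointer), eliminating A's column-major grid fill, sequential re-slicing into the grid, the sorted(...) reordering and the zip(*...) transpose.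
import Mathlib
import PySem

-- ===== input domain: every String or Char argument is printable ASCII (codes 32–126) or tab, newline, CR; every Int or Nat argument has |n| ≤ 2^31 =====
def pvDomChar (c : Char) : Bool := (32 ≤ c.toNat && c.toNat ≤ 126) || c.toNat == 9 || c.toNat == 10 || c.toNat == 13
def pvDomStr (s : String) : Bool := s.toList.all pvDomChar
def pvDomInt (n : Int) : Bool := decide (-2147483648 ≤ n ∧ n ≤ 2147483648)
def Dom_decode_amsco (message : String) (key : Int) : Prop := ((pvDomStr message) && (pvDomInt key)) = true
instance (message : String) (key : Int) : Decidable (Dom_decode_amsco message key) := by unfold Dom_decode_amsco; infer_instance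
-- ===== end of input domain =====

-- B reads each chunk straight out of the ciphertext at an arithmetically computed offset
-- (column start + consumed prefix) instead of A's slice-into-grid / sort / zip-transpose; objective: alternative.

-- ===== PORT A =====

-- digits = [int(d) - 1 for d in str(key)]  (first line of both Pythons, verbatim).
-- `.getD 0`: int(c) raises only for keys with a non-digit character, which Pre_ excludes.
def pvDigits (key : Int) : List Int :=
  (PySem.Int.toChars key).map (fun c => ((PySem.Int.ofChars? [c]).getD 0) - 1)

-- one step of A's inner `for idx, d in enumerate(digits)` loop; state = (cipher_map, n).
-- `.toNat` in `set`: a negative column number occurs only outside Pre_, where A raises before returning.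
def pvStepA (st : List (List Int) × Int) (p : Int × Int) : List (List Int) × Int :=
  let col := PySem.List.pyGetD st.1 p.2 []
  let t := min (PySem.Int.mod (p.1 + (col.length : Int)) 2 + 1) st.2
  (st.1.set p.2.toNat (col ++ [t]), st.2 - t)

-- A's `while n > 0` loop; fuel = n.toNat bounds it (each pass shrinks n by ≥ 1 when digits ≠ []).
def pvFillA (digits : List Int) : Nat → List (List Int) × Int → List (List Int)
  | 0, st => st.1
  | fuel + 1, st =>
    if 0 < st.2 then pvFillA digits fuel ((PySem.List.enumerate digits).foldl pvStepA st)
    else st.1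

-- cipher_map[r][c] = message[0:length]; message = message[length:]
def pvSliceCell (st : List (List Char) × List Char) (t : Int) : List (List Char) × List Char :=
  (st.1 ++ [PySem.List.slice st.2 (some 0) (some t)], PySem.List.slice st.2 (some t))

def pvSliceRowA (st : List (List (List Char)) × List Char) (row : List Int) :
    List (List (List Char)) × List Char :=
  let c := row.foldl pvSliceCell ([], st.2)
  (st.1 ++ [c.1], c.2)

-- termination helpers for pvZipT (cited by its decreasing_by)
theorem pv_tails_le (cols : List (List (List Char))) :
    ((cols.map List.tail).map List.length).sum ≤ (cols.map List.length).sum := by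
  induction cols with
  | nil => simp
  | cons c tl ih =>
    simp only [List.map_cons, List.sum_cons]
    have : c.tail.length ≤ c.length := by cases c <;> simp
    omega

theorem pv_zipT_dec (cols : List (List (List Char)))
    (h1 : cols ≠ []) (h2 : ¬ cols.any List.isEmpty = true) :
    ((cols.map List.tail).map List.length).sum < (cols.map List.length).sum := by
  cases cols with
  | nil => exact absurd rfl h1
  | cons c tl =>
    simp only [List.any_cons, Bool.or_eq_true, not_or] at h2
    have : c.tail.length < c.length := by cases c <;> simp_all
    have := pv_tails_le tl
    simp only [List.map_cons, List.sum_cons]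
    omega

-- zip(*cipher_map): truncating transpose
def pvZipT (cols : List (List (List Char))) : List (List (List Char)) :=
  if h : cols = [] ∨ cols.any List.isEmpty then []
  else (cols.map (fun c => c.headD [])) :: pvZipT (cols.map List.tail)
termination_by (cols.map List.length).sum
decreasing_by
  have h' := pv_zipT_dec cols (not_or.mp h).1 (not_or.mp h).2
  simpa using h'

def decode_amsco (message : String) (key : Int) : String :=
  let digits := pvDigits key
  let msg := message.toList
  let n : Int := (msg.length : Int)
  let cm := pvFillA digits n.toNat (List.replicate digits.length ([] : List Int), n)
  let sliced := (cm.foldl pvSliceRowA ([], msg)).1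
  -- sorted(enumerate(cipher_map), key=lambda e: digits.index(e[0]));
  -- `.getD 0`: digits.index raises ValueError only outside Pre_.
  let srt := (PySem.List.sorted (PySem.List.enumerate sliced)
      (fun e => (PySem.List.index? digits e.1).getD 0)).map (fun e => e.2)
  let rows := pvZipT srt
  String.ofList (PySem.Chars.join [] (rows.map (fun r => PySem.Chars.join [] r)))

-- ===== PORT B =====

-- one pass of B's inner `for idx in range(L)` loop building a row of chunk lengths
def pvRowB (L R : Int) (st : List Int × Int) : List Int × Int :=
  (PySem.List.pyRange 0 L).foldl
    (fun st idx =>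
      let t := min (PySem.Int.mod (idx + R) 2 + 1) st.2
      (st.1 ++ [t], st.2 - t)) st

-- B's `while n > 0` loop (fuel as in A's port)
def pvLensB (L : Int) : Nat → List (List Int) → Int → Int → List (List Int)
  | 0, lens, _, _ => lens
  | fuel + 1, lens, r, n =>
    if 0 < n then
      pvLensB L fuel (lens ++ [(pvRowB L r ([], n)).1]) (r + 1) (pvRowB L r ([], n)).2
    else lens

-- out.append(message[ptr[d]:ptr[d]+row[idx]]); ptr[d] += row[idx]
-- `.toNat` in `set`: a negative column number occurs only outside Pre_.
def pvEmitCell (msg : List Char) (row : List Int) (st : List (List Char) × List Int)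
    (p : Int × Int) : List (List Char) × List Int :=
  let q := PySem.List.pyGetD st.2 p.2 0
  let t := PySem.List.pyGetD row p.1 0
  (st.1 ++ [PySem.List.slice msg (some q) (some (q + t))], st.2.set p.2.toNat (q + t))

def decode_amsco_alt (message : String) (key : Int) : String :=
  let digits := pvDigits key
  let L : Int := (digits.length : Int)
  let msg := message.toList
  let n : Int := (msg.length : Int)
  let lens := pvLensB L n.toNat [] 0 n
  let colTotal := (PySem.List.pyRange 0 L).map
      (fun idx => (lens.map (fun row => PySem.List.pyGetD row idx 0)).sum)
  -- `.getD 0`: digits.index raises ValueError only outside Pre_.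
  let ptr0 := ((PySem.List.pyRange 0 L).foldl
      (fun (st : List Int × Int) d =>
        (st.1 ++ [st.2],
         st.2 + PySem.List.pyGetD colTotal (((PySem.List.index? digits d).getD 0 : Nat) : Int) 0))
      ([], 0)).1
  let out := (lens.foldl
      (fun st row => (PySem.List.enumerate digits).foldl (pvEmitCell msg row) st)
      (([] : List (List Char)), ptr0)).1
  String.ofList (PySem.Chars.join [] out)

-- ===== PRECONDITION & SPEC =====

-- Pre_: the decimal digits of the key are a permutation of 1..len(str(key)) — exactly the keys
-- on which A returns (on any other key int('-') or digits.index raises); the first conjunct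
-- (str(key) nonempty) is true of every integer and excludes nothing.
def Pre_decode_amsco (message : String) (key : Int) : Prop :=
  PySem.Int.toChars key ≠ [] ∧
  ((PySem.Int.toChars key).map (fun c => ((PySem.Int.ofChars? [c]).getD 0) - 1)).Perm
    ((List.range (PySem.Int.toChars key).length).map (fun i : Nat => (i : Int)))

instance (message : String) (key : Int) : Decidable (Pre_decode_amsco message key) := by
  unfold Pre_decode_amsco; infer_instance

def pvWitness_decode_amsco : String × Int := ("SECRETMSG", 3124)

def Spec_decode_amsco (message : String) (key : Int) (out : String) : Prop :=
  out = decode_amsco_alt message key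
instance (message : String) (key : Int) (out : String) : Decidable (Spec_decode_amsco message key out) := by
  unfold Spec_decode_amsco; infer_instance

-- ===== CLAIM (what is proved, stated in full; the proofs are below) =====
def Claim_equal_decode_amsco : Prop := ∀ (message : String) (key : Int), Dom_decode_amsco message key → Pre_decode_amsco message key → Spec_decode_amsco message key (decode_amsco message key)

-- ===== LEMMAS AND PROOFS =====

-- ---- facts about a permutation digit list ----

theorem pv_digits_mem {digits : List Int}
    (hperm : digits.Perm ((List.range digits.length).map (fun i : Nat => (i : Int)))) :
    ∀ d ∈ digits, 0 ≤ d ∧ d < (digits.length : Int) := by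
  intro d hd
  have h := hperm.mem_iff.mp hd
  simp only [List.mem_map] at h
  obtain ⟨i, hi, rfl⟩ := h
  have := List.mem_range.mp hi
  omega

theorem pv_digits_nodup {digits : List Int}
    (hperm : digits.Perm ((List.range digits.length).map (fun i : Nat => (i : Int)))) :
    digits.Nodup := by
  have h : ((List.range digits.length).map (fun i : Nat => (i : Int))).Nodup := by
    refine List.Nodup.map ?_ List.nodup_range
    intro a b hab
    have hab' : (a : Int) = (b : Int) := hab
    exact_mod_cast hab'
  exact hperm.nodup_iff.mpr h

theorem pv_digits_surj {digits : List Int}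
    (hperm : digits.Perm ((List.range digits.length).map (fun i : Nat => (i : Int)))) :
    ∀ e : Nat, e < digits.length → (e : Int) ∈ digits := by
  intro e he
  refine hperm.mem_iff.mpr ?_
  simp only [List.mem_map]
  exact ⟨e, List.mem_range.mpr he, rfl⟩

theorem pv_idxOf_lt {digits : List Int} {d : Int} (hd : d ∈ digits) :
    digits.idxOf d < digits.length :=
  List.idxOf_lt_length_of_mem hd

theorem pv_idxOf_getElem {digits : List Int} (hnd : digits.Nodup) (j : Nat) (hj : j < digits.length) :
    digits.idxOf digits[j] = j :=
  hnd.idxOf_getElem j hj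

theorem pv_index?_eq : ∀ (digits : List Int) (d : Int), d ∈ digits →
    PySem.List.index? digits d = some (digits.idxOf d) := by
  intro digits d hd
  show List.idxOf? d digits = some (digits.idxOf d)
  induction digits with
  | nil => cases hd
  | cons x tl ih =>
    by_cases hx : x = d
    · subst hx
      simp [List.idxOf?_cons, List.idxOf_cons_self]
    · have hd' : d ∈ tl := by
        rcases List.mem_cons.mp hd with h | h
        · exact absurd h.symm hx
        · exact h
      have hne : (x == d) = false := by simp [hx]
      simp [List.idxOf?_cons, hne, List.idxOf_cons_ne _ (by exact hx), ih hd']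

-- ---- small generic helpers ----

theorem pv_pyGetD_set_ne {β : Type} (t : List β) (d e : Int) (x : β) (dft : β)
    (hd : 0 ≤ d) (he : 0 ≤ e) (hne : d ≠ e) :
    PySem.List.pyGetD (t.set d.toNat x) e dft = PySem.List.pyGetD t e dft := by
  rw [PySem.List.pyGetD_of_nonneg _ dft he, PySem.List.pyGetD_of_nonneg _ dft he]
  have hne' : d.toNat ≠ e.toNat := by omega
  simp [List.getD_eq_getElem?_getD, List.getElem?_set_ne hne']

theorem pv_pyGetD_getElem {β : Type} (t : List β) (e : Nat) (dft : β) (he : e < t.length) :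
    PySem.List.pyGetD t (e : Int) dft = t[e] := by
  simp [PySem.List.pyGetD_natCast, List.getD_eq_getElem?_getD, List.getElem?_eq_getElem he]

theorem pv_pyGetD_nonneg (l : List Int) (i : Int) (h : ∀ x ∈ l, 0 ≤ x) :
    0 ≤ PySem.List.pyGetD l i 0 := by
  unfold PySem.List.pyGetD
  cases hg : PySem.List.pyGet? l i with
  | none => simp
  | some x =>
    have hx : x ∈ l := PySem.List.mem_of_pyGet?_eq_some l hg
    simpa using h x hx

theorem pv_cast_sum : ∀ (l : List Int), (∀ x ∈ l, 0 ≤ x) →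
    (((l.map Int.toNat).sum : Nat) : Int) = l.sum := by
  intro l
  induction l with
  | nil => intro _; simp
  | cons x tl ih =>
    intro h
    have hx : 0 ≤ x := h x List.mem_cons_self
    have htl := ih (fun y hy => h y (List.mem_cons_of_mem _ hy))
    simp only [List.map_cons, List.sum_cons]
    rw [Nat.cast_add, Int.toNat_of_nonneg hx, htl]

theorem pv_fold_set_length {β γ : Type} (k : γ → Int) (f : γ → β) :
    ∀ (ps : List γ) (tbl : List β),
    (ps.foldl (fun t p => t.set (k p).toNat (f p)) tbl).length = tbl.length := by
  intro ps
  induction ps with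
  | nil => intro tbl; rfl
  | cons p tl ih => intro tbl; simp [ih]

theorem pv_fold_set_get {β γ : Type} (k : γ → Int) (f : γ → β) :
    ∀ (ps : List γ) (tbl : List β) (e : Nat) (he : e < tbl.length),
    (ps.map k).Nodup →
    (∀ p ∈ ps, 0 ≤ k p ∧ k p < (tbl.length : Int)) →
    (ps.foldl (fun t p => t.set (k p).toNat (f p)) tbl)[e]? =
      some (match ps.find? (fun p => k p == (e : Int)) with
            | some p => f p
            | none => tbl[e]) := by
  intro ps
  induction ps with
  | nil =>
    intro tbl e he _ _
    simp [List.getElem?_eq_getElem he]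
  | cons p tl ih =>
    intro tbl e he hnd hb
    obtain ⟨hp0, hpl⟩ := hb p List.mem_cons_self
    rw [List.map_cons, List.nodup_cons] at hnd
    obtain ⟨hnotin, hnd'⟩ := hnd
    have hb' : ∀ q ∈ tl, 0 ≤ k q ∧ k q < (((tbl.set (k p).toNat (f p)).length : Nat) : Int) := by
      intro q hq
      simpa [List.length_set] using hb q (List.mem_cons_of_mem _ hq)
    have he' : e < (tbl.set (k p).toNat (f p)).length := by simpa [List.length_set] using he
    simp only [List.foldl_cons, List.find?_cons]
    cases hkp : (k p == (e : Int)) with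
    | true =>
      have hke : k p = (e : Int) := by simpa using hkp
      have hfind : tl.find? (fun q => k q == (e : Int)) = none := by
        apply List.find?_eq_none.mpr
        intro q hq
        have hkq : k q ≠ k p := by
          intro hcontra
          apply hnotin
          rw [← hcontra]
          exact List.mem_map_of_mem hq
        simp [hke ▸ hkq]
      rw [ih _ e he' hnd' hb', hfind]
      have hv : (tbl.set (k p).toNat (f p))[e] = f p := by
        have hke' : (k p).toNat = e := by omega
        have h5 := List.getElem?_set (l := tbl) (i := (k p).toNat) (j := e) (a := f p)
        rw [List.getElem?_eq_getElem he', if_pos hke',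
          if_pos (show (k p).toNat < tbl.length by omega)] at h5
        exact Option.some.inj h5
      simp [hv]
    | false =>
      have hke : k p ≠ (e : Int) := by simpa using hkp
      rw [ih _ e he' hnd' hb']
      have hne : (k p).toNat ≠ e := by omega
      have hv : (tbl.set (k p).toNat (f p))[e] = tbl[e] := by
        have h1 := List.getElem?_set_ne (l := tbl) (a := f p) hne
        rw [List.getElem?_eq_getElem he'] at h1
        rw [List.getElem?_eq_getElem he] at h1
        simpa using h1
      rw [hv]

theorem pv_find_enum (e : Int) :
    ∀ (digits : List Int) (s : Int), e ∈ digits →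
    (PySem.List.enumerate digits s).find? (fun p => p.2 == e) =
      some (s + (digits.idxOf e : Int), e) := by
  intro digits
  induction digits with
  | nil => intro s h; cases h
  | cons x tl ih =>
    intro s hmem
    rw [PySem.List.enumerate_cons]
    by_cases hx : x = e
    · subst hx
      simp [List.idxOf_cons_self]
    · have hmem' : e ∈ tl := by
        rcases List.mem_cons.mp hmem with h | h
        · exact absurd h.symm hx
        · exact h
      have hne : (x == e) = false := by simp [hx]
      rw [List.find?_cons]
      simp only [hne]
      rw [ih (s + 1) hmem', List.idxOf_cons_ne _ (by exact hx)]
      congr 2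
      push_cast
      omega

theorem pv_find_enum_zip (e : Int) :
    ∀ (digits ts : List Int) (s : Int), e ∈ digits → digits.length = ts.length →
    ((PySem.List.enumerate digits s).zip ts).find? (fun pt => pt.1.2 == e) =
      some ((s + (digits.idxOf e : Int), e),
        PySem.List.pyGetD ts ((digits.idxOf e : Nat) : Int) 0) := by
  intro digits
  induction digits with
  | nil => intro ts s h _; cases h
  | cons x tl ih =>
    intro ts s hmem hlen
    cases ts with
    | nil => simp at hlen
    | cons t ts' =>
      rw [PySem.List.enumerate_cons]
      by_cases hx : x = e
      · subst hx
        simp [List.idxOf_cons_self]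
      · have hmem' : e ∈ tl := by
          rcases List.mem_cons.mp hmem with h | h
          · exact absurd h.symm hx
          · exact h
        have hne : (x == e) = false := by simp [hx]
        rw [List.zip_cons_cons, List.find?_cons]
        simp only [hne]
        rw [ih ts' (s + 1) hmem' (by simpa using hlen), List.idxOf_cons_ne _ (by exact hx)]
        have h1 : s + 1 + (List.idxOf e tl : Int) = s + ((List.idxOf e tl).succ : Int) := by
          push_cast; omega
        have h2 : PySem.List.pyGetD ts' ((List.idxOf e tl : Nat) : Int) 0
            = PySem.List.pyGetD (t :: ts') (((List.idxOf e tl).succ : Nat) : Int) 0 := by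
          rw [PySem.List.pyGetD_natCast, PySem.List.pyGetD_natCast]
          simp
        rw [h1, h2]

theorem pv_join_nil : ∀ parts : List (List Char), PySem.Chars.join [] parts = parts.flatten := by
  intro parts
  induction parts with
  | nil => simp [PySem.Chars.join_nil]
  | cons p tl ih =>
    cases tl with
    | nil => simp [PySem.Chars.join_singleton]
    | cons q t2 =>
      rw [PySem.Chars.join_cons_cons]
      simp only [List.flatten_cons]
      rw [ih]
      simp

theorem pv_flatMap_congr {α β : Type} (l : List α) (f g : α → List β)
    (h : ∀ a ∈ l, f a = g a) : l.flatMap f = l.flatMap g := by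
  induction l with
  | nil => rfl
  | cons a tl ih =>
    simp only [List.flatMap_cons]
    rw [h a List.mem_cons_self, ih (fun b hb => h b (List.mem_cons_of_mem _ hb))]

-- ---- shared take/left recursions (the per-row chunk lengths) ----

def pvTakes (R : Int) : List Int → Int → List Int
  | [], _ => []
  | i :: is, n =>
    min (PySem.Int.mod (i + R) 2 + 1) n :: pvTakes R is (n - min (PySem.Int.mod (i + R) 2 + 1) n)

def pvLeft (R : Int) : List Int → Int → Int
  | [], n => n
  | i :: is, n => pvLeft R is (n - min (PySem.Int.mod (i + R) 2 + 1) n)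

theorem pvTakes_length (R : Int) : ∀ (is : List Int) (n : Int),
    (pvTakes R is n).length = is.length := by
  intro is
  induction is with
  | nil => intro n; rfl
  | cons i is ih => intro n; simp [pvTakes, ih]

theorem pvTakes_nonneg (R : Int) : ∀ (is : List Int) (n : Int), 0 ≤ n →
    ∀ t ∈ pvTakes R is n, 0 ≤ t := by
  intro is
  induction is with
  | nil => intro n _ t ht; cases ht
  | cons i is ih =>
    intro n hn t ht
    have hmod : 0 ≤ PySem.Int.mod (i + R) 2 := PySem.Int.mod_nonneg _ (by norm_num)
    rcases List.mem_cons.mp ht with h | h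
    · subst h
      exact le_min (by omega) hn
    · exact ih _ (by have := min_le_right (PySem.Int.mod (i + R) 2 + 1) n; omega) t h

theorem pvLeft_nonneg (R : Int) : ∀ (is : List Int) (n : Int), 0 ≤ n → 0 ≤ pvLeft R is n := by
  intro is
  induction is with
  | nil => intro n hn; exact hn
  | cons i is ih =>
    intro n hn
    exact ih _ (by have := min_le_right (PySem.Int.mod (i + R) 2 + 1) n; omega)

theorem pvRowB_char (R : Int) : ∀ (is : List Int) (acc : List Int) (n : Int),
    is.foldl (fun st idx =>
        let t := min (PySem.Int.mod (idx + R) 2 + 1) st.2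
        ((st.1 ++ [t] : List Int), st.2 - t)) (acc, n)
      = (acc ++ pvTakes R is n, pvLeft R is n) := by
  intro is
  induction is with
  | nil => intro acc n; simp [pvTakes, pvLeft]
  | cons i is ih =>
    intro acc n
    simp only [List.foldl_cons]
    rw [ih]
    simp [pvTakes, pvLeft, List.append_assoc]

-- ---- phase 1: A's fill loop equals B's row-major lens loop ----

def pvColOf (digits : List Int) (lens : List (List Int)) (e : Nat) : List Int :=
  lens.map (fun row => PySem.List.pyGetD row ((digits.idxOf (e : Int) : Nat) : Int) 0)

def pvCmOf (digits : List Int) (lens : List (List Int)) : List (List Int) :=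
  (List.range digits.length).map (fun e : Nat => pvColOf digits lens e)

theorem pv_cmOf_length (digits : List Int) (lens : List (List Int)) :
    (pvCmOf digits lens).length = digits.length := by
  simp [pvCmOf]

theorem pv_cmOf_getElem (digits : List Int) (lens : List (List Int)) (e : Nat)
    (he : e < digits.length) :
    (pvCmOf digits lens)[e]'(by simpa [pv_cmOf_length] using he) = pvColOf digits lens e := by
  simp [pvCmOf]

theorem pv_cm_read (digits : List Int) (lens : List (List Int)) (d : Int)
    (h0 : 0 ≤ d) (hL : d < (digits.length : Int)) :
    PySem.List.pyGetD (pvCmOf digits lens) d [] = pvColOf digits lens d.toNat := by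
  obtain ⟨e, rfl⟩ : ∃ e : Nat, d = ((e : Nat) : Int) := ⟨d.toNat, by omega⟩
  have he : e < digits.length := by exact_mod_cast hL
  simp only [Int.toNat_natCast]
  rw [pv_pyGetD_getElem _ _ _ (by simpa [pv_cmOf_length] using he)]
  exact pv_cmOf_getElem digits lens e he

theorem pvStepA_foldl_char (R : Nat) :
    ∀ (ps : List (Int × Int)) (cm : List (List Int)) (n : Int),
    (ps.map Prod.snd).Nodup →
    (∀ p ∈ ps, 0 ≤ p.2 ∧ p.2 < (cm.length : Int)) →
    (∀ p ∈ ps, (PySem.List.pyGetD cm p.2 []).length = R) →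
    ps.foldl pvStepA (cm, n)
      = ((ps.zip (pvTakes (R : Int) (ps.map Prod.fst) n)).foldl
           (fun c pt => c.set pt.1.2.toNat (PySem.List.pyGetD cm pt.1.2 [] ++ [pt.2])) cm,
         pvLeft (R : Int) (ps.map Prod.fst) n) := by
  intro ps
  induction ps with
  | nil => intro cm n _ _ _; simp [pvTakes, pvLeft]
  | cons p tl ih =>
    intro cm n hnd hb hR
    obtain ⟨hp0, hpl⟩ := hb p List.mem_cons_self
    have hRp := hR p List.mem_cons_self
    rw [List.map_cons, List.nodup_cons] at hnd
    obtain ⟨hnotin, hnd2⟩ := hnd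
    set t := min (PySem.Int.mod (p.1 + (R : Int)) 2 + 1) n with ht
    have hstep : pvStepA (cm, n) p
        = (cm.set p.2.toNat (PySem.List.pyGetD cm p.2 [] ++ [t]), n - t) := by
      simp [pvStepA, hRp, ht]
    set cm1 := cm.set p.2.toNat (PySem.List.pyGetD cm p.2 [] ++ [t]) with hcm1
    have hreads : ∀ q ∈ tl, PySem.List.pyGetD cm1 q.2 [] = PySem.List.pyGetD cm q.2 [] := by
      intro q hq
      have hq2 := hb q (List.mem_cons_of_mem _ hq)
      have hpq : p.2 ≠ q.2 := by
        intro hcontra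
        apply hnotin
        rw [hcontra]
        exact List.mem_map_of_mem hq
      exact pv_pyGetD_set_ne cm p.2 q.2 _ [] hp0 hq2.1 hpq
    have hb' : ∀ q ∈ tl, 0 ≤ q.2 ∧ q.2 < ((cm1.length : Nat) : Int) := by
      intro q hq
      simpa [hcm1, List.length_set] using hb q (List.mem_cons_of_mem _ hq)
    have hR' : ∀ q ∈ tl, (PySem.List.pyGetD cm1 q.2 []).length = R := by
      intro q hq
      rw [hreads q hq]
      exact hR q (List.mem_cons_of_mem _ hq)
    simp only [List.foldl_cons, hstep]
    rw [ih cm1 (n - t) hnd2 hb' hR']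
    simp only [List.map_cons, pvTakes, pvLeft, Prod.mk.injEq]
    refine ⟨?_, by trivial⟩
    rw [← ht, List.zip_cons_cons, List.foldl_cons]
    have hfirst : cm.set p.2.toNat (PySem.List.pyGetD cm p.2 [] ++ [t]) = cm1 := rfl
    rw [hfirst]
    apply PySem.List.foldl_congr_mem
    intro acc x hx
    have hx1 : x.1 ∈ tl := (List.of_mem_zip hx).1
    rw [hreads x.1 hx1]

theorem pvRowA_eq (digits : List Int)
    (hperm : digits.Perm ((List.range digits.length).map (fun i : Nat => (i : Int))))
    (lens : List (List Int)) (n : Int)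
    (hrows : ∀ row ∈ lens, row.length = digits.length) :
    (PySem.List.enumerate digits).foldl pvStepA (pvCmOf digits lens, n)
      = (pvCmOf digits (lens ++ [(pvRowB (digits.length : Int) (lens.length : Int) ([], n)).1]),
         (pvRowB (digits.length : Int) (lens.length : Int) ([], n)).2) := by
  have hnd := pv_digits_nodup hperm
  have hmemd := pv_digits_mem hperm
  have hmem_of : ∀ p ∈ PySem.List.enumerate digits 0, p.2 ∈ digits := by
    intro p hp
    have h : p.2 ∈ (PySem.List.enumerate digits 0).map Prod.snd := List.mem_map_of_mem hp
    rwa [PySem.List.map_snd_enumerate] at h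
  have hchar := pvStepA_foldl_char lens.length (PySem.List.enumerate digits 0)
      (pvCmOf digits lens) n
      (by rw [PySem.List.map_snd_enumerate]; exact hnd)
      (by
        intro p hp
        have := hmemd p.2 (hmem_of p hp)
        simpa [pv_cmOf_length] using this)
      (by
        intro p hp
        have h2 := hmemd p.2 (hmem_of p hp)
        rw [pv_cm_read digits lens p.2 h2.1 h2.2]
        simp [pvColOf])
  have hfst : (PySem.List.enumerate digits 0).map Prod.fst = PySem.List.pyRange 0 (digits.length : Int) := by
    have := PySem.List.map_fst_enumerate digits 0
    simpa using this
  have hrowB := pvRowB_char (lens.length : Int)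
      (PySem.List.pyRange 0 (digits.length : Int)) [] n
  have hrowB' : pvRowB (digits.length : Int) (lens.length : Int) ([], n)
      = (pvTakes (lens.length : Int) (PySem.List.pyRange 0 (digits.length : Int)) n,
         pvLeft (lens.length : Int) (PySem.List.pyRange 0 (digits.length : Int)) n) := by
    unfold pvRowB
    rw [hrowB]
    simp
  show (PySem.List.enumerate digits 0).foldl pvStepA (pvCmOf digits lens, n) = _
  rw [hchar, hfst, hrowB']
  set ts := pvTakes (lens.length : Int) (PySem.List.pyRange 0 (digits.length : Int)) n with hts
  have htslen : ts.length = digits.length := by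
    rw [hts, pvTakes_length, PySem.List.pyRange_zero_natCast]
    simp
  simp only [Prod.mk.injEq]
  refine ⟨?_, trivial⟩
  apply List.ext_getElem?
  intro e
  by_cases he : e < digits.length
  · have hel : e < (pvCmOf digits lens).length := by simpa [pv_cmOf_length] using he
    have hget := pv_fold_set_get (fun pt : (Int × Int) × Int => pt.1.2)
        (fun pt => PySem.List.pyGetD (pvCmOf digits lens) pt.1.2 [] ++ [pt.2])
        ((PySem.List.enumerate digits 0).zip ts) (pvCmOf digits lens) e hel
        (by
          have hm : ((PySem.List.enumerate digits 0).zip ts).map (fun pt : (Int × Int) × Int => pt.1.2)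
              = digits := by
            have h1 : ((PySem.List.enumerate digits 0).zip ts).map Prod.fst
                = PySem.List.enumerate digits 0 :=
              List.map_fst_zip (by simp [htslen, PySem.List.length_enumerate])
            calc ((PySem.List.enumerate digits 0).zip ts).map (fun pt : (Int × Int) × Int => pt.1.2)
                = (((PySem.List.enumerate digits 0).zip ts).map Prod.fst).map Prod.snd := by
                  rw [List.map_map]; rfl
              _ = digits := by rw [h1, PySem.List.map_snd_enumerate]
          rw [hm]; exact hnd)
        (by
          intro pt hpt
          have h1 : pt.1 ∈ PySem.List.enumerate digits 0 := (List.of_mem_zip hpt).1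
          have := hmemd pt.1.2 (hmem_of pt.1 h1)
          simpa [pv_cmOf_length] using this)
    simp only [] at hget
    rw [hget]
    have hfind := pv_find_enum_zip (e : Int) digits ts 0
        (pv_digits_surj hperm e he) htslen.symm
    rw [hfind]
    have hcolget : (pvCmOf digits (lens ++ [ts]))[e]? =
        some (pvColOf digits (lens ++ [ts]) e) := by
      have h3 : e < (pvCmOf digits (lens ++ [ts])).length := by simpa [pv_cmOf_length] using he
      rw [List.getElem?_eq_getElem h3, pv_cmOf_getElem digits _ e he]
    rw [hcolget]
    have hread : PySem.List.pyGetD (pvCmOf digits lens) (e : Int) [] = pvColOf digits lens e := by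
      have := pv_cm_read digits lens (e : Int) (by omega) (by exact_mod_cast he)
      simpa using this
    simp only [hread]
    congr 1
    simp [pvColOf]
  · have h1 : (pvCmOf digits (lens ++ [ts])).length ≤ e := by
      simp [pv_cmOf_length]; omega
    have h2 : (((PySem.List.enumerate digits 0).zip ts).foldl
        (fun c pt => c.set pt.1.2.toNat (PySem.List.pyGetD (pvCmOf digits lens) pt.1.2 [] ++ [pt.2]))
        (pvCmOf digits lens)).length ≤ e := by
      have h4 := pv_fold_set_length (fun pt : (Int × Int) × Int => pt.1.2)
        (fun pt => PySem.List.pyGetD (pvCmOf digits lens) pt.1.2 [] ++ [pt.2])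
        ((PySem.List.enumerate digits 0).zip ts) (pvCmOf digits lens)
      simp only [] at h4
      rw [h4, pv_cmOf_length]
      omega
    rw [List.getElem?_eq_none h2, List.getElem?_eq_none h1]

theorem pv_cmOf_nil (digits : List Int) :
    List.replicate digits.length ([] : List Int) = pvCmOf digits [] := by
  symm
  rw [List.eq_replicate_iff]
  constructor
  · simp [pv_cmOf_length]
  · intro b hb
    simp only [pvCmOf, List.mem_map] at hb
    obtain ⟨e, _, rfl⟩ := hb
    rfl

theorem pvFill_eq (digits : List Int)
    (hperm : digits.Perm ((List.range digits.length).map (fun i : Nat => (i : Int)))) :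
    ∀ (fuel : Nat) (lens : List (List Int)) (n : Int),
    (∀ row ∈ lens, row.length = digits.length) →
    pvFillA digits fuel (pvCmOf digits lens, n)
      = pvCmOf digits (pvLensB (digits.length : Int) fuel lens (lens.length : Int) n) := by
  intro fuel
  induction fuel with
  | zero => intro lens n _; simp [pvFillA, pvLensB]
  | succ fuel ih =>
    intro lens n hrows
    by_cases h : 0 < n
    · have hrA := pvRowA_eq digits hperm lens n hrows
      set rb := pvRowB (digits.length : Int) (lens.length : Int) ([], n) with hrb
      have hlen1 : rb.1.length = digits.length := by
        rw [hrb]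
        unfold pvRowB
        rw [pvRowB_char]
        simp [pvTakes_length, PySem.List.pyRange_zero_natCast]
      have hrows' : ∀ row ∈ lens ++ [rb.1], row.length = digits.length := by
        intro row hrow
        rcases List.mem_append.mp hrow with hr | hr
        · exact hrows row hr
        · simp only [List.mem_singleton] at hr; rw [hr]; exact hlen1
      have hlc : (((lens ++ [rb.1]).length : Nat) : Int) = (lens.length : Int) + 1 := by
        simp
      simp only [pvFillA]
      rw [if_pos h, hrA, ih (lens ++ [rb.1]) rb.2 hrows', hlc]
      simp only [pvLensB]
      rw [if_pos h]
    · simp only [pvFillA, pvLensB]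
      rw [if_neg h, if_neg h]

theorem pvLensB_facts (L : Int) : ∀ (fuel : Nat) (lens : List (List Int)) (r n : Int),
    0 ≤ n →
    (∀ row ∈ lens, row.length = (PySem.List.pyRange 0 L).length ∧ ∀ t ∈ row, 0 ≤ t) →
    ∀ row ∈ pvLensB L fuel lens r n,
      row.length = (PySem.List.pyRange 0 L).length ∧ ∀ t ∈ row, 0 ≤ t := by
  intro fuel
  induction fuel with
  | zero => intro lens r n _ hl; simpa [pvLensB] using hl
  | succ fuel ih =>
    intro lens r n hn hl
    simp only [pvLensB]
    by_cases h : 0 < n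
    · rw [if_pos h]
      have hrb : pvRowB L r ([], n) = (pvTakes r (PySem.List.pyRange 0 L) n,
          pvLeft r (PySem.List.pyRange 0 L) n) := by
        unfold pvRowB
        rw [pvRowB_char]
        simp
      apply ih
      · rw [hrb]
        exact pvLeft_nonneg r _ n hn
      · intro row hrow
        rcases List.mem_append.mp hrow with hr | hr
        · exact hl row hr
        · simp only [List.mem_singleton] at hr
          subst hr
          rw [hrb]
          exact ⟨pvTakes_length r _ n, pvTakes_nonneg r _ n hn⟩
    · rw [if_neg h]
      exact hl

-- ---- phase 2a: A's sequential slicing pass ----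

def pvCells : List Char → List Int → List (List Char)
  | _, [] => []
  | rest, t :: ts => rest.take t.toNat :: pvCells (rest.drop t.toNat) ts

def pvColCells : List Char → List (List Int) → List (List (List Char))
  | _, [] => []
  | rest, row :: tl => pvCells rest row :: pvColCells (rest.drop ((row.map Int.toNat).sum)) tl

theorem pvCells_length : ∀ (ts : List Int) (rest : List Char),
    (pvCells rest ts).length = ts.length := by
  intro ts
  induction ts with
  | nil => intro rest; rfl
  | cons t ts ih => intro rest; simp [pvCells, ih]

theorem pvColCells_length : ∀ (cm : List (List Int)) (rest : List Char),
    (pvColCells rest cm).length = cm.length := by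
  intro cm
  induction cm with
  | nil => intro rest; rfl
  | cons row tl ih => intro rest; simp [pvColCells, ih]

theorem pv_sliceRow_char : ∀ (row : List Int) (acc : List (List Char)) (rest : List Char),
    (∀ t ∈ row, 0 ≤ t) →
    row.foldl pvSliceCell (acc, rest)
      = (acc ++ pvCells rest row, rest.drop ((row.map Int.toNat).sum)) := by
  intro row
  induction row with
  | nil => intro acc rest _; simp [pvCells]
  | cons t ts ih =>
    intro acc rest h
    have ht : 0 ≤ t := h t List.mem_cons_self
    have hstep : pvSliceCell (acc, rest) t = (acc ++ [rest.take t.toNat], rest.drop t.toNat) := by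
      unfold pvSliceCell
      rw [PySem.List.slice_zero_start, PySem.List.slice_to _ ht, PySem.List.slice_from _ ht]
    simp only [List.foldl_cons, hstep]
    rw [ih _ _ (fun x hx => h x (List.mem_cons_of_mem _ hx))]
    simp [pvCells, List.append_assoc, List.drop_drop]

theorem pv_sliceAll_char : ∀ (cm : List (List Int)) (acc : List (List (List Char))) (rest : List Char),
    (∀ row ∈ cm, ∀ t ∈ row, 0 ≤ t) →
    cm.foldl pvSliceRowA (acc, rest)
      = (acc ++ pvColCells rest cm,
         rest.drop ((cm.map (fun row => (row.map Int.toNat).sum)).sum)) := by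
  intro cm
  induction cm with
  | nil => intro acc rest _; simp [pvColCells]
  | cons row tl ih =>
    intro acc rest h
    have hstep : pvSliceRowA (acc, rest) row
        = (acc ++ [pvCells rest row], rest.drop ((row.map Int.toNat).sum)) := by
      unfold pvSliceRowA
      rw [pv_sliceRow_char row [] rest (h row List.mem_cons_self)]
      simp
    simp only [List.foldl_cons, hstep]
    rw [ih _ _ (fun r hr => h r (List.mem_cons_of_mem _ hr))]
    simp [pvColCells, List.append_assoc, List.drop_drop]

theorem pvColCells_get : ∀ (cm : List (List Int)) (rest : List Char) (e : Nat)
    (he : e < cm.length),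
    (pvColCells rest cm)[e]? =
      some (pvCells (rest.drop (((cm.take e).map (fun row => (row.map Int.toNat).sum)).sum))
        cm[e]) := by
  intro cm
  induction cm with
  | nil => intro rest e he; simp at he
  | cons row tl ih =>
    intro rest e he
    cases e with
    | zero => simp [pvColCells]
    | succ e =>
      have he' : e < tl.length := by simpa using he
      simp only [pvColCells, List.getElem?_cons_succ]
      rw [ih _ e he']
      simp [List.drop_drop]

theorem pvCells_get : ∀ (ts : List Int) (rest : List Char) (r : Nat) (hr : r < ts.length),
    (pvCells rest ts)[r]? =
      some ((rest.drop (((ts.take r).map Int.toNat).sum)).take (ts[r].toNat)) := by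
  intro ts
  induction ts with
  | nil => intro rest r hr; simp at hr
  | cons t ts ih =>
    intro rest r hr
    cases r with
    | zero => simp [pvCells]
    | succ r =>
      have hr' : r < ts.length := by simpa using hr
      simp only [pvCells, List.getElem?_cons_succ]
      rw [ih _ r hr']
      simp [List.drop_drop]

-- ---- phase 2b: the sort is a fixed permutation; the zip is a transpose ----

theorem pv_sorted_char (digits : List Int)
    (hperm : digits.Perm ((List.range digits.length).map (fun i : Nat => (i : Int))))
    (sliced : List (List (List Char))) (hlen : sliced.length = digits.length) :
    (PySem.List.sorted (PySem.List.enumerate sliced)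
        (fun e => (PySem.List.index? digits e.1).getD 0)).map (fun e => e.2)
      = digits.map (fun dI => PySem.List.pyGetD sliced dI []) := by
  have hnd := pv_digits_nodup hperm
  set f : Int → Int × List (List Char) := fun dI => (dI, PySem.List.pyGetD sliced dI []) with hf
  have henum : PySem.List.enumerate sliced
      = ((List.range digits.length).map (fun i : Nat => (i : Int))).map f := by
    rw [PySem.List.enumerate_eq_map_pyRange sliced []]
    have hl : PySem.List.len sliced = ((sliced.length : Nat) : Int) := by
      simp [PySem.List.len]
    rw [hl, hlen, PySem.List.pyRange_zero_natCast, List.map_map]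
  have hsorted : PySem.List.sorted (PySem.List.enumerate sliced)
      (fun e => (PySem.List.index? digits e.1).getD 0) = digits.map f := by
    apply PySem.List.sorted_eq_of_perm_of_pairwise_lt
    · rw [henum]
      exact hperm.map f
    · rw [List.pairwise_map, List.pairwise_iff_getElem]
      intro i j hi hj hij
      have hmi : digits[i] ∈ digits := List.getElem_mem hi
      have hmj : digits[j] ∈ digits := List.getElem_mem hj
      show ((PySem.List.index? digits (f digits[i]).1).getD 0)
        < ((PySem.List.index? digits (f digits[j]).1).getD 0)
      rw [hf]
      simp only []
      rw [pv_index?_eq digits _ hmi, pv_index?_eq digits _ hmj]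
      rw [pv_idxOf_getElem hnd i hi, pv_idxOf_getElem hnd j hj]
      simpa using hij
  rw [hsorted, List.map_map]
  rfl

theorem pv_zipT_char : ∀ (R : Nat) (cols : List (List (List Char))),
    cols ≠ [] → (∀ c ∈ cols, c.length = R) →
    pvZipT cols = (List.range R).map (fun r => cols.map (fun c => c.getD r [])) := by
  intro R
  induction R with
  | zero =>
    intro cols hne hlen
    rw [pvZipT]
    have hany : cols.any List.isEmpty = true := by
      cases cols with
      | nil => exact absurd rfl hne
      | cons c tl =>
        have h0 : c.length = 0 := hlen c List.mem_cons_self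
        have hc : c = [] := List.length_eq_zero_iff.mp h0
        simp [hc]
    rw [dif_pos (Or.inr hany)]
    simp
  | succ R ih =>
    intro cols hne hlen
    have hnonempty : ∀ c ∈ cols, c ≠ [] := by
      intro c hc hcnil
      have := hlen c hc
      rw [hcnil] at this
      simp at this
    have hcond : ¬ (cols = [] ∨ cols.any List.isEmpty = true) := by
      refine not_or.mpr ⟨hne, ?_⟩
      simp only [List.any_eq_true, not_exists, not_and, Bool.not_eq_true]
      intro c hc
      simp [hnonempty c hc]
    rw [pvZipT, dif_neg hcond]
    have htail : pvZipT (cols.map List.tail)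
        = (List.range R).map (fun r => (cols.map List.tail).map (fun c => c.getD r [])) := by
      apply ih
      · simpa using hne
      · intro c hc
        simp only [List.mem_map] at hc
        obtain ⟨c0, hc0, rfl⟩ := hc
        have := hlen c0 hc0
        simp [List.length_tail, this]
    rw [htail, List.range_succ_eq_map, List.map_cons, List.map_map]
    congr 1
    · apply List.map_congr_left
      intro c hc
      obtain ⟨x, xs, rfl⟩ := List.exists_cons_of_ne_nil (hnonempty c hc)
      simp
    · apply List.map_congr_left
      intro r _
      show (cols.map List.tail).map (fun c => c.getD r []) = cols.map (fun c => c.getD (Nat.succ r) [])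
      rw [List.map_map]
      apply List.map_congr_left
      intro c hc
      show c.tail.getD r [] = c.getD (Nat.succ r) []
      rw [List.getD_eq_getElem?_getD, List.getD_eq_getElem?_getD, List.getElem?_tail]

-- ---- phase 2c: B's offset table and emission loop ----

def pvScan (g : Int → Int) : List Int → Int → List Int
  | [], _ => []
  | d :: is, a => a :: pvScan g is (a + g d)

theorem pvScan_length (g : Int → Int) : ∀ (is : List Int) (a : Int),
    (pvScan g is a).length = is.length := by
  intro is
  induction is with
  | nil => intro a; rfl
  | cons d is ih => intro a; simp [pvScan, ih]

theorem pv_scan_char (g : Int → Int) : ∀ (is : List Int) (acc : List Int) (a : Int),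
    is.foldl (fun (st : List Int × Int) d => ((st.1 ++ [st.2] : List Int), st.2 + g d)) (acc, a)
      = (acc ++ pvScan g is a, a + (is.map g).sum) := by
  intro is
  induction is with
  | nil => intro acc a; simp [pvScan]
  | cons d is ih =>
    intro acc a
    simp only [List.foldl_cons]
    rw [ih]
    simp [pvScan, List.append_assoc]
    omega

theorem pvScan_get (g : Int → Int) : ∀ (is : List Int) (a : Int) (e : Nat) (he : e < is.length),
    (pvScan g is a)[e]? = some (a + ((is.take e).map g).sum) := by
  intro is
  induction is with
  | nil => intro a e he; simp at he
  | cons d is ih =>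
    intro a e he
    cases e with
    | zero => simp [pvScan]
    | succ e =>
      have he' : e < is.length := by simpa using he
      simp only [pvScan, List.getElem?_cons_succ]
      rw [ih _ e he']
      congr 1
      simp [List.take_succ_cons]
      omega

def pvPtrNext (digits : List Int) (ptr row : List Int) : List Int :=
  (List.range digits.length).map
    (fun e : Nat => PySem.List.pyGetD ptr ((e : Nat) : Int) 0
      + PySem.List.pyGetD row ((digits.idxOf ((e : Nat) : Int) : Nat) : Int) 0)

theorem pvPtrNext_length (digits ptr row : List Int) :
    (pvPtrNext digits ptr row).length = digits.length := by
  simp [pvPtrNext]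

theorem pvPtrNext_get (digits ptr row : List Int) (e : Nat) (he : e < digits.length) :
    (pvPtrNext digits ptr row)[e]? = some (PySem.List.pyGetD ptr ((e : Nat) : Int) 0
      + PySem.List.pyGetD row ((digits.idxOf ((e : Nat) : Int) : Nat) : Int) 0) := by
  rw [pvPtrNext, List.getElem?_map, List.getElem?_range he]
  rfl

theorem pvEmit_row_char (msg : List Char) (row : List Int) :
    ∀ (ps : List (Int × Int)) (out : List (List Char)) (ptr : List Int),
    (ps.map Prod.snd).Nodup →
    (∀ p ∈ ps, 0 ≤ p.2 ∧ p.2 < (ptr.length : Int)) →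
    ps.foldl (pvEmitCell msg row) (out, ptr)
      = (out ++ ps.map (fun p => PySem.List.slice msg (some (PySem.List.pyGetD ptr p.2 0))
            (some (PySem.List.pyGetD ptr p.2 0 + PySem.List.pyGetD row p.1 0))),
         ps.foldl (fun t p => t.set p.2.toNat
            (PySem.List.pyGetD ptr p.2 0 + PySem.List.pyGetD row p.1 0)) ptr) := by
  intro ps
  induction ps with
  | nil => intro out ptr _ _; simp
  | cons p tl ih =>
    intro out ptr hnd hb
    obtain ⟨hp0, hpl⟩ := hb p List.mem_cons_self
    rw [List.map_cons, List.nodup_cons] at hnd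
    obtain ⟨hnotin, hnd2⟩ := hnd
    set v := PySem.List.pyGetD ptr p.2 0 with hv
    set w := PySem.List.pyGetD row p.1 0 with hw
    have hstep : pvEmitCell msg row (out, ptr) p
        = (out ++ [PySem.List.slice msg (some v) (some (v + w))], ptr.set p.2.toNat (v + w)) := by
      simp [pvEmitCell, hv, hw]
    set ptr1 := ptr.set p.2.toNat (v + w) with hptr1
    have hreads : ∀ q ∈ tl, PySem.List.pyGetD ptr1 q.2 0 = PySem.List.pyGetD ptr q.2 0 := by
      intro q hq
      have hq2 := hb q (List.mem_cons_of_mem _ hq)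
      have hpq : p.2 ≠ q.2 := by
        intro hcontra
        apply hnotin
        rw [hcontra]
        exact List.mem_map_of_mem hq
      exact pv_pyGetD_set_ne ptr p.2 q.2 _ 0 hp0 hq2.1 hpq
    have hb' : ∀ q ∈ tl, 0 ≤ q.2 ∧ q.2 < ((ptr1.length : Nat) : Int) := by
      intro q hq
      simpa [hptr1, List.length_set] using hb q (List.mem_cons_of_mem _ hq)
    simp only [List.foldl_cons, hstep]
    rw [ih _ ptr1 hnd2 hb']
    simp only [List.map_cons, Prod.mk.injEq]
    constructor
    · rw [List.append_assoc, List.singleton_append]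
      congr 2
      apply List.map_congr_left
      intro q hq
      rw [hreads q hq]
    · have hstart : ptr.set p.2.toNat
          (PySem.List.pyGetD ptr p.2 0 + PySem.List.pyGetD row p.1 0) = ptr1 := rfl
      rw [hstart]
      apply PySem.List.foldl_congr_mem
      intro acc q hq
      rw [hreads q hq]

def pvEmitSpec (msg : List Char) (digits : List Int) : List Int → List (List Int) → List (List Char)
  | _, [] => []
  | ptr, row :: tl =>
    (PySem.List.enumerate digits).map
        (fun p => PySem.List.slice msg (some (PySem.List.pyGetD ptr p.2 0))
          (some (PySem.List.pyGetD ptr p.2 0 + PySem.List.pyGetD row p.1 0)))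
      ++ pvEmitSpec msg digits (pvPtrNext digits ptr row) tl

theorem pv_emit_all (msg : List Char) (digits : List Int)
    (hperm : digits.Perm ((List.range digits.length).map (fun i : Nat => (i : Int)))) :
    ∀ (rows : List (List Int)) (out : List (List Char)) (ptr : List Int),
    ptr.length = digits.length →
    (rows.foldl (fun st row => (PySem.List.enumerate digits).foldl (pvEmitCell msg row) st)
        (out, ptr)).1
      = out ++ pvEmitSpec msg digits ptr rows := by
  have hnd := pv_digits_nodup hperm
  have hmemd := pv_digits_mem hperm
  intro rows
  induction rows with
  | nil => intro out ptr _; simp [pvEmitSpec]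
  | cons row tl ih =>
    intro out ptr hptr
    have hmem_of : ∀ p ∈ PySem.List.enumerate digits 0, p.2 ∈ digits := by
      intro p hp
      have h : p.2 ∈ (PySem.List.enumerate digits 0).map Prod.snd := List.mem_map_of_mem hp
      rwa [PySem.List.map_snd_enumerate] at h
    have hrow := pvEmit_row_char msg row (PySem.List.enumerate digits 0) out ptr
        (by rw [PySem.List.map_snd_enumerate]; exact hnd)
        (by
          intro p hp
          have := hmemd p.2 (hmem_of p hp)
          simpa [hptr] using this)
    set ptr1 := (PySem.List.enumerate digits 0).foldl
        (fun t p => t.set p.2.toNat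
          (PySem.List.pyGetD ptr p.2 0 + PySem.List.pyGetD row p.1 0)) ptr with hptr1
    have hptr1len : ptr1.length = digits.length := by
      rw [hptr1]
      have h4 := pv_fold_set_length (fun p : Int × Int => p.2)
        (fun p => PySem.List.pyGetD ptr p.2 0 + PySem.List.pyGetD row p.1 0)
        (PySem.List.enumerate digits 0) ptr
      simp only [] at h4
      rw [h4, hptr]
    have hptr1eq : ptr1 = pvPtrNext digits ptr row := by
      apply List.ext_getElem?
      intro e
      by_cases he : e < digits.length
      · have hget := pv_fold_set_get (fun p : Int × Int => p.2)
            (fun p => PySem.List.pyGetD ptr p.2 0 + PySem.List.pyGetD row p.1 0)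
            (PySem.List.enumerate digits 0) ptr e (by rw [hptr]; exact he)
            (by rw [PySem.List.map_snd_enumerate]; exact hnd)
            (by
              intro p hp
              have := hmemd p.2 (hmem_of p hp)
              simpa [hptr] using this)
        simp only [] at hget
        rw [hptr1, hget]
        rw [pv_find_enum (e : Int) digits 0 (pv_digits_surj hperm e he)]
        rw [pvPtrNext_get digits ptr row e he]
        simp
      · rw [List.getElem?_eq_none (by rw [hptr1len]; omega),
           List.getElem?_eq_none (by rw [pvPtrNext_length]; omega)]
    simp only [List.foldl_cons]
    rw [hrow, ih _ ptr1 hptr1len, hptr1eq]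
    rw [pvEmitSpec]
    simp [List.append_assoc]

-- ---- the per-cell value both programs produce ----

def pvColStart (digits : List Int) (lensF : List (List Int)) (e : Nat) : Int :=
  ((List.range e).map (fun d' : Nat => (pvColOf digits lensF d').sum)).sum

def pvCellA (msg : List Char) (digits : List Int) (lensF : List (List Int)) (e r : Nat) : List Char :=
  (msg.drop ((((pvCmOf digits lensF).take e).map (fun row => (row.map Int.toNat).sum)).sum
      + (((pvColOf digits lensF e).take r).map Int.toNat).sum)).take
    (((pvColOf digits lensF e).getD r 0).toNat)

theorem pv_colOf_length (digits : List Int) (lensF : List (List Int)) (e : Nat) :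
    (pvColOf digits lensF e).length = lensF.length := by
  simp [pvColOf]

theorem pv_colOf_nonneg (digits : List Int) (lensF : List (List Int)) (e : Nat)
    (h : ∀ row ∈ lensF, ∀ t ∈ row, 0 ≤ t) :
    ∀ t ∈ pvColOf digits lensF e, 0 ≤ t := by
  intro t ht
  simp only [pvColOf, List.mem_map] at ht
  obtain ⟨row, hrow, rfl⟩ := ht
  exact pv_pyGetD_nonneg _ _ (h row hrow)

theorem pv_colStart_cast (digits : List Int) (lensF : List (List Int))
    (hnn : ∀ row ∈ lensF, ∀ t ∈ row, 0 ≤ t) (e : Nat) (he : e ≤ digits.length) :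
    pvColStart digits lensF e
      = (((((pvCmOf digits lensF).take e).map (fun row => (row.map Int.toNat).sum)).sum : Nat) : Int) := by
  rw [pvColStart, pvCmOf, ← List.map_take, List.take_range, Nat.min_eq_left he]
  rw [List.map_map, Nat.cast_list_sum, List.map_map]
  congr 1
  apply List.map_congr_left
  intro d' _
  simp only [Function.comp]
  exact (pv_cast_sum _ (pv_colOf_nonneg digits lensF d' hnn)).symm

theorem pv_spec_rows (msg : List Char) (digits : List Int)
    (hperm : digits.Perm ((List.range digits.length).map (fun i : Nat => (i : Int))))
    (lensF : List (List Int))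
    (hrows : ∀ row ∈ lensF, row.length = digits.length ∧ ∀ t ∈ row, 0 ≤ t) :
    ∀ (m k : Nat) (ptr : List Int), lensF.length - k = m → ptr.length = digits.length →
    (∀ e : Nat, e < digits.length →
        PySem.List.pyGetD ptr ((e : Nat) : Int) 0
          = pvColStart digits lensF e + ((pvColOf digits lensF e).take k).sum) →
    pvEmitSpec msg digits ptr (lensF.drop k)
      = (List.range m).flatMap
          (fun j => (PySem.List.enumerate digits).map
             (fun p => pvCellA msg digits lensF p.2.toNat (k + j))) := by
  have hnd := pv_digits_nodup hperm
  have hmemd := pv_digits_mem hperm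
  have hnn : ∀ row ∈ lensF, ∀ t ∈ row, 0 ≤ t := fun row hr => (hrows row hr).2
  intro m
  induction m with
  | zero =>
    intro k ptr hm _ _
    rw [List.drop_eq_nil_of_le (by omega)]
    simp [pvEmitSpec]
  | succ m ihm =>
    intro k ptr hm hptr hp
    have hk : k < lensF.length := by omega
    rw [List.drop_eq_getElem_cons hk, pvEmitSpec]
    set row := lensF[k] with hrowdef
    have hrowlen : row.length = digits.length := (hrows row (List.getElem_mem hk)).1
    have hrownn : ∀ t ∈ row, 0 ≤ t := (hrows row (List.getElem_mem hk)).2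
    rw [List.range_succ_eq_map, List.flatMap_cons]
    have hhead : (PySem.List.enumerate digits).map
          (fun p => PySem.List.slice msg (some (PySem.List.pyGetD ptr p.2 0))
            (some (PySem.List.pyGetD ptr p.2 0 + PySem.List.pyGetD row p.1 0)))
        = (PySem.List.enumerate digits).map
            (fun p => pvCellA msg digits lensF p.2.toNat (k + 0)) := by
      apply List.map_congr_left
      intro p hp'
      obtain ⟨j, hj, hpe⟩ := (PySem.List.mem_enumerate_iff _ _ _).mp hp'
      subst hpe
      simp only [Nat.add_zero]
      have hdj := hmemd digits[j] (List.getElem_mem hj)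
      have hejlt : digits[j].toNat < digits.length := by omega
      have hcast : digits[j] = ((digits[j].toNat : Nat) : Int) := by omega
      set e := digits[j].toNat with hedef
      have hidx : digits.idxOf ((e : Nat) : Int) = j := by
        rw [← hcast]
        exact pv_idxOf_getElem hnd j hj
      -- the chunk length of this cell
      have hkcol : k < (pvColOf digits lensF e).length := by
        rw [pv_colOf_length]; exact hk
      have hT : (pvColOf digits lensF e).getD k 0
          = PySem.List.pyGetD row ((0 : Int) + (j : Int)) 0 := by
        have hg : (pvColOf digits lensF e).getD k 0 = (pvColOf digits lensF e)[k]'hkcol := by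
          rw [List.getD_eq_getElem?_getD, List.getElem?_eq_getElem hkcol]
          rfl
        rw [hg]
        simp only [pvColOf, List.getElem_map, hidx, ← hrowdef]
        norm_num
      have hTnn : 0 ≤ PySem.List.pyGetD row ((0 : Int) + (j : Int)) 0 :=
        pv_pyGetD_nonneg _ _ hrownn
      -- start offset as a natural number
      have hS : PySem.List.pyGetD ptr ((e : Nat) : Int) 0
          = (((((pvCmOf digits lensF).take e).map (fun row => (row.map Int.toNat).sum)).sum
              + (((pvColOf digits lensF e).take k).map Int.toNat).sum : Nat) : Int) := by
        rw [hp e hejlt, pv_colStart_cast digits lensF hnn e (le_of_lt hejlt)]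
        rw [← pv_cast_sum ((pvColOf digits lensF e).take k)
          (fun t ht => pv_colOf_nonneg digits lensF e hnn t (List.mem_of_mem_take ht))]
        push_cast
        ring
      show PySem.List.slice msg (some (PySem.List.pyGetD ptr digits[j] 0))
          (some (PySem.List.pyGetD ptr digits[j] 0 + PySem.List.pyGetD row ((0:Int)+(j:Int)) 0))
        = pvCellA msg digits lensF e k
      rw [show PySem.List.pyGetD ptr digits[j] 0 = PySem.List.pyGetD ptr ((e : Nat) : Int) 0 from by rw [← hcast]]
      rw [hS]
      rw [show PySem.List.pyGetD row ((0:Int)+(j:Int)) 0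
          = (((PySem.List.pyGetD row ((0:Int)+(j:Int)) 0).toNat : Nat) : Int) from
        (by rw [Int.toNat_of_nonneg hTnn])]
      rw [PySem.List.slice_natCast_add]
      rw [pvCellA, hT]
    rw [hhead]
    congr 1
    have hptr' : (pvPtrNext digits ptr row).length = digits.length := pvPtrNext_length digits ptr row
    have hp' : ∀ e : Nat, e < digits.length →
        PySem.List.pyGetD (pvPtrNext digits ptr row) ((e : Nat) : Int) 0
          = pvColStart digits lensF e + ((pvColOf digits lensF e).take (k + 1)).sum := by
      intro e he
      have hg := pvPtrNext_get digits ptr row e he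
      rw [List.getElem?_eq_getElem (by rw [pvPtrNext_length]; exact he)] at hg
      have hv := Option.some.inj hg
      rw [pv_pyGetD_getElem _ e 0 (by rw [pvPtrNext_length]; exact he), hv]
      rw [hp e he]
      have hkcol : k < (pvColOf digits lensF e).length := by
        rw [pv_colOf_length]; exact hk
      have hcolk : (pvColOf digits lensF e)[k]'hkcol
          = PySem.List.pyGetD row ((digits.idxOf ((e : Nat) : Int) : Nat) : Int) 0 := by
        simp only [pvColOf, List.getElem_map, ← hrowdef]
      rw [List.sum_take_succ _ k hkcol, hcolk]
      ring
    have htail := ihm (k + 1) (pvPtrNext digits ptr row) (by omega) hptr' hp'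
    rw [htail]
    have hmm : ((List.range m).map Nat.succ).flatMap
          (fun j => (PySem.List.enumerate digits).map
            (fun p => pvCellA msg digits lensF p.2.toNat (k + j)))
        = (List.range m).flatMap
            (fun j => (PySem.List.enumerate digits).map
              (fun p => pvCellA msg digits lensF p.2.toNat (k + Nat.succ j))) := by
      rw [List.flatMap_def, List.map_map, ← List.flatMap_def]
      rfl
    rw [hmm]
    apply pv_flatMap_congr
    intro j _
    apply List.map_congr_left
    intro p _
    congr 1
    omega

theorem pv_main (message : String) (key : Int) (hpre : Pre_decode_amsco message key) :
    decode_amsco message key = decode_amsco_alt message key := by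
  obtain ⟨hne, hperm0⟩ := hpre
  have hperm : (pvDigits key).Perm
      ((List.range (pvDigits key).length).map (fun i : Nat => (i : Int))) := by
    have hl : (pvDigits key).length = (PySem.Int.toChars key).length := by
      simp [pvDigits]
    rw [hl]
    exact hperm0
  have hnd := pv_digits_nodup hperm
  have hmemd := pv_digits_mem hperm
  have hdne : pvDigits key ≠ [] := by
    simp only [pvDigits, ne_eq, List.map_eq_nil_iff]
    exact hne
  set digits := pvDigits key with hdig
  set msg := message.toList with hmsg
  set n : Int := ((msg.length : Nat) : Int) with hn
  have hn0 : 0 ≤ n := by rw [hn]; exact Int.natCast_nonneg _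
  have hRangeLen : (PySem.List.pyRange 0 ((digits.length : Nat) : Int)).length = digits.length := by
    rw [PySem.List.pyRange_zero_natCast]; simp
  set lensF := pvLensB ((digits.length : Nat) : Int) n.toNat [] 0 n with hlensF
  have hrows : ∀ row ∈ lensF, row.length = digits.length ∧ ∀ t ∈ row, 0 ≤ t := by
    intro row hr
    have h := pvLensB_facts ((digits.length : Nat) : Int) n.toNat [] 0 n hn0
      (by intro row h; cases h) row hr
    rwa [hRangeLen] at h
  have hrows' : ∀ row ∈ lensF, row.length = digits.length ∧ ∀ t ∈ row, 0 ≤ t := hrows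
  set R := lensF.length with hR
  set cm := pvCmOf digits lensF with hcm
  have hcm_nonneg : ∀ col ∈ cm, ∀ t ∈ col, 0 ≤ t := by
    intro col hcol t ht
    rw [hcm] at hcol
    simp only [pvCmOf, List.mem_map] at hcol
    obtain ⟨e, _, rfl⟩ := hcol
    exact pv_colOf_nonneg digits lensF e (fun row hr => (hrows row hr).2) t ht
  set sliced := pvColCells msg cm with hsliced
  have hslen : sliced.length = digits.length := by
    rw [hsliced, pvColCells_length, hcm, pv_cmOf_length]
  have hcolget : ∀ e : Nat, e < digits.length →
      PySem.List.pyGetD sliced ((e : Nat) : Int) []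
        = pvCells (msg.drop (((cm.take e).map (fun row => (row.map Int.toNat).sum)).sum))
            (pvColOf digits lensF e) := by
    intro e he
    have he' : e < cm.length := by rw [hcm, pv_cmOf_length]; exact he
    have hg := pvColCells_get cm msg e he'
    rw [← hsliced] at hg
    rw [List.getElem?_eq_getElem (show e < sliced.length by rw [hslen]; exact he)] at hg
    have hv := Option.some.inj hg
    rw [pv_pyGetD_getElem sliced e [] (by rw [hslen]; exact he), hv]
    have hcme : cm[e]'he' = pvColOf digits lensF e := by
      simp [hcm, pvCmOf]
    rw [hcme]
  set cols := digits.map (fun dI => PySem.List.pyGetD sliced dI []) with hcols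
  have hcols_len : ∀ c ∈ cols, c.length = R := by
    intro c hc
    rw [hcols] at hc
    simp only [List.mem_map] at hc
    obtain ⟨dI, hdI, rfl⟩ := hc
    obtain ⟨h0, hL'⟩ := hmemd dI hdI
    have he : dI.toNat < digits.length := by omega
    rw [show dI = ((dI.toNat : Nat) : Int) from by omega, hcolget dI.toNat he]
    rw [pvCells_length, pv_colOf_length]
  have hcols_ne : cols ≠ [] := by
    rw [hcols]
    simpa using hdne
  have hcell : ∀ e : Nat, e < digits.length → ∀ r : Nat, r < R →
      (PySem.List.pyGetD sliced ((e : Nat) : Int) []).getD r []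
        = pvCellA msg digits lensF e r := by
    intro e he r hr
    rw [hcolget e he]
    have hrlen : r < (pvColOf digits lensF e).length := by
      rw [pv_colOf_length]
      exact hr
    rw [List.getD_eq_getElem?_getD, pvCells_get _ _ r hrlen]
    simp only [Option.getD_some]
    rw [pvCellA, List.drop_drop]
    congr 1
    rw [List.getD_eq_getElem?_getD, List.getElem?_eq_getElem hrlen]
    rfl
  -- ---- A side in canonical form ----
  have hAside : decode_amsco message key
      = String.ofList (((List.range R).map (fun r =>
          (cols.map (fun c => c.getD r [])).flatten)).flatten) := by
    simp only [decode_amsco]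
    rw [← hdig, ← hmsg, ← hn]
    rw [pv_cmOf_nil digits]
    rw [pvFill_eq digits hperm n.toNat [] n (by intro r h; cases h)]
    simp only [List.length_nil, Nat.cast_zero]
    rw [← hlensF, ← hcm]
    rw [pv_sliceAll_char cm [] msg hcm_nonneg]
    simp only [List.nil_append]
    rw [← hsliced]
    rw [pv_sorted_char digits hperm sliced hslen]
    rw [← hcols]
    rw [pv_zipT_char R cols hcols_ne hcols_len]
    rw [pv_join_nil, List.map_map]
    congr 2
    apply List.map_congr_left
    intro r _
    simp only [Function.comp]
    rw [pv_join_nil]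
  -- ---- B side in canonical form ----
  set colTotalF := (PySem.List.pyRange 0 ((digits.length : Nat) : Int)).map
      (fun idx => (lensF.map (fun row => PySem.List.pyGetD row idx 0)).sum) with hct
  set ptr0F := pvScan
      (fun d => PySem.List.pyGetD colTotalF (((PySem.List.index? digits d).getD 0 : Nat) : Int) 0)
      (PySem.List.pyRange 0 ((digits.length : Nat) : Int)) 0 with hptr0
  have hptr0len : ptr0F.length = digits.length := by
    rw [hptr0, pvScan_length, hRangeLen]
  have hBside : decode_amsco_alt message key
      = String.ofList ((pvEmitSpec msg digits ptr0F lensF).flatten) := by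
    simp only [decode_amsco_alt]
    rw [← hdig, ← hmsg, ← hn]
    rw [← hlensF, ← hct]
    have hscan := pv_scan_char
      (fun d => PySem.List.pyGetD colTotalF (((PySem.List.index? digits d).getD 0 : Nat) : Int) 0)
      (PySem.List.pyRange 0 ((digits.length : Nat) : Int)) [] 0
    simp only [] at hscan
    rw [hscan]
    simp only [List.nil_append]
    rw [← hptr0]
    rw [pv_emit_all msg digits hperm lensF [] ptr0F hptr0len]
    simp only [List.nil_append]
    rw [pv_join_nil]
  -- ---- the two canonical forms agree ----
  rw [hAside, hBside]
  -- ptr0F entries are the column start offsets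
  have hp0 : ∀ e : Nat, e < digits.length →
      PySem.List.pyGetD ptr0F ((e : Nat) : Int) 0
        = pvColStart digits lensF e + ((pvColOf digits lensF e).take 0).sum := by
    intro e he
    have hg := pvScan_get
      (fun d => PySem.List.pyGetD colTotalF (((PySem.List.index? digits d).getD 0 : Nat) : Int) 0)
      (PySem.List.pyRange 0 ((digits.length : Nat) : Int)) 0 e (by rw [hRangeLen]; exact he)
    rw [← hptr0] at hg
    rw [List.getElem?_eq_getElem (by rw [hptr0len]; exact he)] at hg
    have hv := Option.some.inj hg
    rw [pv_pyGetD_getElem ptr0F e 0 (by rw [hptr0len]; exact he), hv]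
    simp only [List.sum_nil, List.take_zero, add_zero, zero_add]
    -- the prefix of pyRange is a range
    have htk : (PySem.List.pyRange 0 ((digits.length : Nat) : Int)).take e
        = (List.range e).map (fun i : Nat => (i : Int)) := by
      rw [PySem.List.pyRange_zero_natCast, ← List.map_take, List.take_range,
        Nat.min_eq_left (le_of_lt he)]
    rw [htk, List.map_map, pvColStart]
    apply congrArg
    apply List.map_congr_left
    intro d' hd'
    have hd'lt : d' < digits.length := lt_of_lt_of_le (List.mem_range.mp hd') (le_of_lt he)
    have hmemd' : ((d' : Nat) : Int) ∈ digits := pv_digits_surj hperm d' hd'lt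
    simp only [Function.comp]
    rw [pv_index?_eq digits _ hmemd']
    simp only [Option.getD_some]
    have hidxlt : digits.idxOf ((d' : Nat) : Int) < digits.length := pv_idxOf_lt hmemd'
    have hctlen : digits.idxOf ((d' : Nat) : Int) < colTotalF.length := by
      rw [hct, List.length_map, hRangeLen]; exact hidxlt
    have h6 : colTotalF[digits.idxOf ((d' : Nat) : Int)]?
        = some ((pvColOf digits lensF d').sum) := by
      rw [hct, List.getElem?_map, PySem.List.pyRange_zero_natCast, List.getElem?_map,
        List.getElem?_range hidxlt]
      simp [pvColOf]
    have hval : colTotalF[digits.idxOf ((d' : Nat) : Int)]'hctlen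
        = (pvColOf digits lensF d').sum := by
      rw [List.getElem?_eq_getElem hctlen] at h6
      exact Option.some.inj h6
    rw [pv_pyGetD_getElem colTotalF _ 0 hctlen, hval]
  have hspec := pv_spec_rows msg digits hperm lensF hrows' R 0 ptr0F (by omega) hptr0len hp0
  rw [List.drop_zero] at hspec
  rw [hspec]
  simp only [Nat.zero_add]
  rw [List.flatMap_def, List.flatten_flatten, List.map_map]
  congr 2
  apply List.map_congr_left
  intro r hr
  have hrR : r < R := List.mem_range.mp hr
  simp only [Function.comp]
  congr 1
  have h1 : (PySem.List.enumerate digits).map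
        (fun p => pvCellA msg digits lensF p.2.toNat r)
      = digits.map (fun dI => pvCellA msg digits lensF dI.toNat r) := by
    have h2 : ((PySem.List.enumerate digits 0).map Prod.snd).map
        (fun dI => pvCellA msg digits lensF dI.toNat r)
        = (PySem.List.enumerate digits 0).map (fun p => pvCellA msg digits lensF p.2.toNat r) := by
      rw [List.map_map]
      rfl
    rw [← h2, PySem.List.map_snd_enumerate]
  have h3 : cols.map (fun c => c.getD r []) = digits.map (fun dI => pvCellA msg digits lensF dI.toNat r) := by
    rw [hcols, List.map_map]
    apply List.map_congr_left
    intro dI hdI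
    simp only [Function.comp]
    obtain ⟨h0, hL'⟩ := hmemd dI hdI
    obtain ⟨e, rfl⟩ : ∃ e : Nat, dI = ((e : Nat) : Int) := ⟨dI.toNat, by omega⟩
    simp only [Int.toNat_natCast]
    exact hcell e (by exact_mod_cast hL') r hrR
  rw [h1, h3]

-- ===== VERDICT (by name: the statement is the Claim_ definition above) =====
theorem decode_amsco_spec : Claim_equal_decode_amsco := by
  intro message key _hdom hpre
  unfold Spec_decode_amsco
  exact pv_main message key hpre
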